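-- pv_equiv track=rewrite | github.com/wow-kim/Algorithm | Programmers/2단계_이진_변환_반복기.py | solution
-- ===== SOURCE A (Python) =====
-- def solution(s):
--     conversion = 0
--     eliminated = 0
--     while s != "1":
--         eliminated += len(s)
--         s = "".join([i for i in s if i=="1"])
--         eliminated -= len(s)
--         s = format(len(s),"b")
--         conversion += 1
--
--     return [conversion, eliminated]
-- ===== SOURCE B (Python) =====
-- def solution(s):
--     # Integer-state reformulation: after the first step the string is always bin(n),
--     # so track n, its bit-length and popcount arithmetically instead of rebuilding strings.
--     if s == "1":
--         return [0, 0]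
--     ones = s.count('1')
--     conversion = 1
--     eliminated = len(s) - ones
--     n = ones
--     while n != 1:
--         length = 0
--         p = 0
--         m = n
--         while m:
--             length += 1
--             p += m & 1
--             m >>= 1
--         eliminated += length - p
--         conversion += 1
--         n = p
--     return [conversion, eliminated]
-- ===== Notes on version B (the rewrite author's own statement) =====
-- stated objective: alternative
-- what changed: B replaces A's repeated string rebuilding (filter the string to its '1's, re-format the count in binary each round) by pure integer state: one initial count of '1's, then a loop on the integer n computing bit-length and popcount by halving, never constructing a string.
import Mathlib
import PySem

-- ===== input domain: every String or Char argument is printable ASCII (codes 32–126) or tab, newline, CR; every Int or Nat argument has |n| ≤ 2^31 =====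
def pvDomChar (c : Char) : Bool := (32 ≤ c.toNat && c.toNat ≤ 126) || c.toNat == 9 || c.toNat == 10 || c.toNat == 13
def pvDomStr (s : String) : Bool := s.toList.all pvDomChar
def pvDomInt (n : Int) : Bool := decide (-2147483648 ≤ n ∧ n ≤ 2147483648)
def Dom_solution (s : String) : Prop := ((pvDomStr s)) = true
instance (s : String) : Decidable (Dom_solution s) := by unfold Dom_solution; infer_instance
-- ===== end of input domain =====

-- B replaces A's per-round string rebuilding by pure integer state (count of ones, bit-length,
-- popcount by halving); same return value everywhere A terminates (objective: alternative).

-- ===== PORT A =====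

-- '"".join([i for i in s if i=="1"])' : the characters of s equal to '1'
def keepOnes (s : List Char) : List Char := s.filter (fun i => i == '1')

-- format(n, "b") by repeated halving, most significant digit first; the first argument is
-- fuel making the halving recursion structural (fuel n suffices, proved below the claim)
def binAux : Nat → Nat → List Char
  | 0, _ => []
  | fuel + 1, n =>
    if n = 0 then []
    else binAux fuel (n / 2) ++ [if n % 2 = 1 then '1' else '0']

-- format(n, "b"): format(0,"b") = "0"
def binChars (n : Nat) : List Char :=
  if n = 0 then ['0'] else binAux n n

-- the while loop of A (state: conversion, eliminated, s as List Char); the fuel argument is a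
-- totality device only: fuel s.length + s.count '1' + 1 is enough on every input where the
-- Python loop terminates (proved below); Python loops forever on strings with no '1' (outside Pre_)
def solLoop : Nat → Int → Int → List Char → List Int
  | 0, conv, elim, _ => [conv, elim]
  | fuel + 1, conv, elim, s =>
    if s = ['1'] then [conv, elim]
    else if (keepOnes s).length = 0 then [conv, elim]
    else solLoop fuel (conv + 1) (elim + (s.length : Int) - ((keepOnes s).length : Int))
          (binChars (keepOnes s).length)

def solution (s : String) : List Int :=
  solLoop (s.toList.length + s.toList.count '1' + 1) 0 0 s.toList

-- ===== PORT B =====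

-- the inner `while m:` loop of B: (length, p) = bit-length and popcount of m by halving;
-- first argument is structural fuel (fuel m suffices, proved below the claim)
def bitStats : Nat → Nat → Nat × Nat
  | 0, _ => (0, 0)
  | fuel + 1, m =>
    if m = 0 then (0, 0)
    else ((bitStats fuel (m / 2)).1 + 1, (bitStats fuel (m / 2)).2 + m % 2)

-- the outer `while n != 1:` loop of B; structural fuel again (n + 1 is enough, proved below);
-- Python loops forever when n reaches 0 (outside Pre_)
def altLoop : Nat → Int → Int → Nat → List Int
  | 0, conv, elim, _ => [conv, elim]
  | fuel + 1, conv, elim, n =>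
    if n = 1 then [conv, elim]
    else if n = 0 then [conv, elim]
    else altLoop fuel (conv + 1)
          (elim + ((bitStats n n).1 : Int) - ((bitStats n n).2 : Int)) (bitStats n n).2

def solution_alt (s : String) : List Int :=
  if s = "1" then [0, 0]
  else
    -- s.count('1') for a one-character pattern = number of '1' characters (exact)
    altLoop (s.toList.count '1' + 1) 1
      ((s.toList.length : Int) - (s.toList.count '1' : Int)) (s.toList.count '1')

-- ===== PRECONDITION & SPEC =====
-- Pre_ excludes exactly the strings containing no '1', on which Python A loops forever
-- and never returns; A returns on every string containing a '1'.
def Pre_solution (s : String) : Prop := '1' ∈ s.toList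
instance (s : String) : Decidable (Pre_solution s) := by unfold Pre_solution; infer_instance
def pvWitness_solution : String := "0110"

def Spec_solution (s : String) (out : List Int) : Prop := out = solution_alt s
instance (s : String) (out : List Int) : Decidable (Spec_solution s out) := by unfold Spec_solution; infer_instance

-- ===== CLAIM (what is proved, stated in full; the proofs are below) =====
def Claim_equal_solution : Prop := ∀ (s : String), Dom_solution s → Pre_solution s → Spec_solution s (solution s)

-- ===== LEMMAS AND PROOFS =====

-- fuel adequacy: binAux is fuel-independent once fuel ≥ n
theorem binAux_fuel (n : Nat) : ∀ f g, n ≤ f → n ≤ g → binAux f n = binAux g n := by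
  induction n using Nat.strong_induction_on with
  | _ n ih =>
    intro f g hf hg
    by_cases h : n = 0
    · subst h
      cases f <;> cases g <;> simp [binAux]
    · obtain ⟨f', rfl⟩ : ∃ f', f = f' + 1 := ⟨f - 1, by omega⟩
      obtain ⟨g', rfl⟩ : ∃ g', g = g' + 1 := ⟨g - 1, by omega⟩
      have hlt : n / 2 < n := Nat.div_lt_self (Nat.pos_of_ne_zero h) (by norm_num)
      simp only [binAux, h]
      rw [ih (n / 2) hlt f' g' (by omega) (by omega)]

theorem binN_succ (n : Nat) (h : n ≠ 0) :
    binAux n n = binAux (n / 2) (n / 2) ++ [if n % 2 = 1 then '1' else '0'] := by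
  obtain ⟨m, rfl⟩ : ∃ m, n = m + 1 := ⟨n - 1, by omega⟩
  simp only [binAux, h, reduceIte]
  rw [binAux_fuel ((m + 1) / 2) m ((m + 1) / 2) (by omega) (le_refl _)]

theorem binN_one : binAux 1 1 = ['1'] := by decide

theorem binN_count_le (n : Nat) : (binAux n n).count '1' ≤ n := by
  induction n using Nat.strong_induction_on with
  | _ n ih =>
    by_cases h : n = 0
    · simp [h, binAux]
    · rw [binN_succ n h, List.count_append]
      have := ih (n / 2) (Nat.div_lt_self (Nat.pos_of_ne_zero h) (by norm_num))
      by_cases hm : n % 2 = 1 <;> simp [hm] <;> omega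

theorem binN_len_le (n : Nat) : (binAux n n).length ≤ n := by
  induction n using Nat.strong_induction_on with
  | _ n ih =>
    by_cases h : n = 0
    · simp [h, binAux]
    · rw [binN_succ n h, List.length_append]
      have := ih (n / 2) (Nat.div_lt_self (Nat.pos_of_ne_zero h) (by norm_num))
      simp; omega

theorem binN_count_lt (n : Nat) (h2 : 2 ≤ n) : (binAux n n).count '1' < n := by
  rw [binN_succ n (by omega), List.count_append]
  have := binN_count_le (n / 2)
  by_cases hm : n % 2 = 1 <;> simp [hm] <;> omega

theorem keepOnes_len (s : List Char) : (keepOnes s).length = s.count '1' := by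
  simp [keepOnes, List.count, List.countP_eq_length_filter]

-- A's loop measure strictly decreases on each iteration of its while loop
theorem measure_dec (s : List Char) (h1 : s ≠ ['1']) (hk : (keepOnes s).length ≠ 0) :
    (binChars (keepOnes s).length).length + (binChars (keepOnes s).length).count '1' <
      s.length + s.count '1' := by
  have hkc := keepOnes_len s
  have hle : (keepOnes s).length ≤ s.length := List.length_filter_le _ _
  set k := (keepOnes s).length with hkdef
  rw [binChars, if_neg hk]
  by_cases h2 : 2 ≤ k
  · have := binN_count_lt k h2
    have := binN_len_le k
    omega
  · have hk1 : k = 1 := by omega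
    have hs2 : 2 ≤ s.length := by
      rcases s with _ | ⟨c, _ | ⟨d, t⟩⟩
      · simp [keepOnes] at hkdef; omega
      · exfalso
        by_cases hc : c = '1'
        · exact h1 (by rw [hc])
        · rw [hkdef] at hk1
          simp [keepOnes, List.filter, show (c == '1') = false by simp [hc]] at hk1
      · simp
    rw [hk1, binN_one]
    have hcount : (['1'] : List Char).count '1' = 1 := by decide
    rw [hcount]
    simp only [List.length_singleton]
    omega

-- fuel adequacy for bitStats
theorem bitStats_fuel (m : Nat) : ∀ f g, m ≤ f → m ≤ g → bitStats f m = bitStats g m := by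
  induction m using Nat.strong_induction_on with
  | _ m ih =>
    intro f g hf hg
    by_cases h : m = 0
    · subst h
      cases f <;> cases g <;> simp [bitStats]
    · obtain ⟨f', rfl⟩ : ∃ f', f = f' + 1 := ⟨f - 1, by omega⟩
      obtain ⟨g', rfl⟩ : ∃ g', g = g' + 1 := ⟨g - 1, by omega⟩
      have hlt : m / 2 < m := Nat.div_lt_self (Nat.pos_of_ne_zero h) (by norm_num)
      simp only [bitStats, h]
      rw [ih (m / 2) hlt f' g' (by omega) (by omega)]

theorem statsN_succ (m : Nat) (h : m ≠ 0) :
    bitStats m m = ((bitStats (m / 2) (m / 2)).1 + 1, (bitStats (m / 2) (m / 2)).2 + m % 2) := by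
  obtain ⟨k, rfl⟩ : ∃ k, m = k + 1 := ⟨m - 1, by omega⟩
  simp only [bitStats, h, reduceIte]
  rw [bitStats_fuel ((k + 1) / 2) k ((k + 1) / 2) (by omega) (le_refl _)]

theorem statsN_snd_pos (n : Nat) (h : 1 ≤ n) : 1 ≤ (bitStats n n).2 := by
  induction n using Nat.strong_induction_on with
  | _ n ih =>
    rw [statsN_succ n (by omega)]
    by_cases h2 : n / 2 = 0
    · have h1 : n = 1 := by omega
      subst h1; simp
    · have := ih (n / 2) (Nat.div_lt_self (by omega) (by norm_num)) (by omega)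
      simp; omega

-- length and '1'-count of the binary string are exactly bitStats
theorem binN_stats (n : Nat) :
    (binAux n n).length = (bitStats n n).1 ∧ (binAux n n).count '1' = (bitStats n n).2 := by
  induction n using Nat.strong_induction_on with
  | _ n ih =>
    by_cases h : n = 0
    · simp [h, binAux, bitStats]
    · rw [binN_succ n h, statsN_succ n h]
      obtain ⟨hl, hc⟩ := ih (n / 2) (Nat.div_lt_self (Nat.pos_of_ne_zero h) (by norm_num))
      constructor
      · simp [hl]
      · rw [List.count_append, hc]
        have hm : n % 2 = 0 ∨ n % 2 = 1 := by omega
        rcases hm with hm | hm <;> simp [hm]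

theorem binN_eq_one_iff (n : Nat) (h : 1 ≤ n) : binAux n n = ['1'] ↔ n = 1 := by
  constructor
  · intro he
    by_contra hne
    have hd : n / 2 ≠ 0 := by omega
    have hlen := congrArg List.length he
    rw [binN_succ n (by omega), List.length_append] at hlen
    have hp : 1 ≤ (binAux (n / 2) (n / 2)).length := by
      rw [binN_succ (n / 2) hd, List.length_append]; simp
    simp only [List.length_singleton] at hlen; omega
  · intro h1; subst h1; exact binN_one

-- key lemma: A's loop on the binary string of n equals B's loop on n, for n ≥ 1,
-- whenever both sides carry enough fuel
theorem loop_eq (n : Nat) (h : 1 ≤ n) :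
    ∀ fa fb conv elim,
      (binChars n).length + (binChars n).count '1' < fa → n < fb →
      solLoop fa conv elim (binChars n) = altLoop fb conv elim n := by
  induction n using Nat.strong_induction_on with
  | _ n ih =>
    intro fa fb conv elim hfa hfb
    have h0 : n ≠ 0 := by omega
    obtain ⟨fa', rfl⟩ : ∃ f, fa = f + 1 := ⟨fa - 1, by omega⟩
    obtain ⟨fb', rfl⟩ : ∃ f, fb = f + 1 := ⟨fb - 1, by omega⟩
    rw [binChars, if_neg h0] at hfa ⊢
    by_cases h1 : n = 1
    · subst h1
      rw [solLoop, altLoop, binN_one]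
      simp
    · rw [solLoop, altLoop, if_neg h1, if_neg h0]
      have hne : binAux n n ≠ ['1'] := fun he => h1 ((binN_eq_one_iff n h).mp he)
      rw [if_neg hne]
      have hflt : (keepOnes (binAux n n)).length = (bitStats n n).2 := by
        rw [keepOnes_len, (binN_stats n).2]
      have hpos := statsN_snd_pos n h
      have hz : ¬ (keepOnes (binAux n n)).length = 0 := by omega
      rw [if_neg hz, hflt, (binN_stats n).1]
      have hlt : (bitStats n n).2 < n := by
        have := (binN_stats n).2
        have := binN_count_lt n (by omega)
        omega
      have hmd := measure_dec (binAux n n) hne (by omega)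
      rw [hflt] at hmd
      have hfa' : (binChars (bitStats n n).2).length + (binChars (bitStats n n).2).count '1' < fa' := by
        omega
      exact ih (bitStats n n).2 hlt hpos fa' fb' _ _ hfa' (by omega)

theorem string_eq_one (s : String) : s = "1" ↔ s.toList = ['1'] := by
  constructor
  · intro h; rw [h]; rfl
  · intro h
    have := congrArg String.ofList h
    rwa [String.ofList_toList] at this

theorem solution_eq (s : String) (hp : Pre_solution s) : solution s = solution_alt s := by
  unfold solution solution_alt Pre_solution at *
  by_cases h1 : s = "1"
  · rw [if_pos h1, (string_eq_one s).mp h1]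
    simp [solLoop]
  · rw [if_neg h1]
    have hne : s.toList ≠ ['1'] := fun he => h1 ((string_eq_one s).mpr he)
    rw [solLoop, if_neg hne]
    have hkc := keepOnes_len s.toList
    have hpos : 0 < s.toList.count '1' := List.count_pos_iff.mpr hp
    have hz : ¬ (keepOnes s.toList).length = 0 := by omega
    rw [if_neg hz, hkc]
    have harith : (0 : Int) + (s.toList.length : Int) - (s.toList.count '1' : Int)
        = (s.toList.length : Int) - (s.toList.count '1' : Int) := by ring
    rw [harith]
    have hmd := measure_dec s.toList hne (by omega)
    rw [hkc] at hmd
    exact loop_eq (s.toList.count '1') hpos _ _ 1 _ (by omega) (by omega)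

-- ===== VERDICT (by name: the statement is the Claim_ definition above) =====
theorem solution_spec : Claim_equal_solution := by
  intro s _ hp
  unfold Spec_solution
  exact solution_eq s hp
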